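-- pv_equiv track=rewrite | github.com/yyy01/LLMRiskEval_RCC | Components/generator.py | formula_split
-- ===== SOURCE A (Python) =====
-- def formula_split(formula : str) -> list:
--     formula = formula.strip(' ')
--     result, pos = [], 0
--
--     def get_type(ch) :
--         return 'number' if ch.isdigit() or ch == '.' else 'other'
--
--     def judge_type(ori, cur) :
--         return get_type(ori) == get_type(cur)
--
--     for id, ch in enumerate(formula) :
--         if judge_type(ch, formula[pos]) : continue
--         else : result.append(formula[pos:id]); pos = id
--     result.append(formula[pos:])
--     return result
-- ===== SOURCE B (Python) =====
-- def formula_split(formula : str) -> list: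
--     def is_num(ch):
--         return ch.isdigit() or ch == '.'
--     groups = []
--     cur = ''
--     for ch in formula.strip(' '):
--         if cur and is_num(cur[-1]) != is_num(ch):
--             groups.append(cur)
--             cur = ''
--         cur += ch
--     groups.append(cur)
--     return groups
-- ===== Notes on version B (the rewrite author's own statement) =====
-- stated objective: simpler
-- what changed: replaces A's position-tracking loop (index pos, transition test against formula[pos], slicing the string on each type change) with a single accumulator that builds the current run character by character and pushes it on a type change
import Mathlib
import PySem

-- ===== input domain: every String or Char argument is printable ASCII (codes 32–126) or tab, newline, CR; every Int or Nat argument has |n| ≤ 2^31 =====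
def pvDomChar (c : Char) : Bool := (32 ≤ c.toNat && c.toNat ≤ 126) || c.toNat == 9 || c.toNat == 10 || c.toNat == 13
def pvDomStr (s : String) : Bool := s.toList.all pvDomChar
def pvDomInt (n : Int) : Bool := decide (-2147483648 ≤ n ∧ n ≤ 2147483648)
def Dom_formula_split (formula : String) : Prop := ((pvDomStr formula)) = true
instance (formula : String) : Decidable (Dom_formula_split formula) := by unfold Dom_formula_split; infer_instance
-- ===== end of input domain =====

-- B replaces A's position-tracking/slicing on type transitions with a single run accumulator; objective: simpler.

-- ===== PORT A =====
def fsGetType (ch : Char) : String :=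
  if PySem.Chars.isdigit ch || ch == '.' then "number" else "other"

def fsJudge (ori cur : Char) : Bool := fsGetType ori == fsGetType cur

-- loop body of A: state (result, pos); formula[pos] is always in range, getD ' ' is never used
def fsStepA (l : List Char) (st : List (List Char) × Nat) (p : Char × Nat) :
    List (List Char) × Nat :=
  if fsJudge p.1 ((PySem.List.pyGet? l ((st.2 : Nat) : Int)).getD ' ') then st
  else (st.1 ++ [PySem.List.slice l (some ((st.2 : Nat) : Int)) (some ((p.2 : Nat) : Int))], p.2)

def formula_split (formula : String) : List String :=
  let l := PySem.Chars.stripChars formula.toList [' ']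
  let st := (l.zipIdx).foldl (fsStepA l) ([], 0)
  (st.1 ++ [PySem.List.slice l (some ((st.2 : Nat) : Int)) none]).map String.ofList

-- ===== PORT B =====
def fsIsNum (ch : Char) : Bool := PySem.Chars.isdigit ch || ch == '.'

-- loop body of B: state (groups, cur); cur[-1] exists exactly when cur is truthy
def fsStepB (st : List (List Char) × List Char) (ch : Char) :
    List (List Char) × List Char :=
  match st.2.getLast? with
  | some last =>
      if fsIsNum last != fsIsNum ch then (st.1 ++ [st.2], [ch]) else (st.1, st.2 ++ [ch])
  | none => (st.1, st.2 ++ [ch])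

def formula_split_alt (formula : String) : List String :=
  let st := (PySem.Chars.stripChars formula.toList [' ']).foldl fsStepB ([], [])
  (st.1 ++ [st.2]).map String.ofList

-- ===== PRECONDITION & SPEC =====
def Spec_formula_split (formula : String) (out : List String) : Prop := out = formula_split_alt formula
instance (formula : String) (out : List String) : Decidable (Spec_formula_split formula out) := by unfold Spec_formula_split; infer_instance

-- ===== CLAIM (what is proved, stated in full; the proofs are below) =====
def Claim_equal_formula_split : Prop := ∀ (formula : String), Dom_formula_split formula → Spec_formula_split formula (formula_split formula)

-- ===== LEMMAS AND PROOFS =====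

lemma fsJudge_eq (a b : Char) : fsJudge a b = (fsIsNum a == fsIsNum b) := by
  unfold fsJudge fsGetType fsIsNum
  by_cases h1 : (PySem.Chars.isdigit a || a == '.') = true <;>
    by_cases h2 : (PySem.Chars.isdigit b || b == '.') = true <;>
    simp [h1, h2]

-- invariant-carrying induction: prefix p consumed, current run is p.drop pos
lemma fs_key : ∀ (r p : List Char) (res : List (List Char)) (pos : Nat),
    (pos < p.length ∨ (p = [] ∧ pos = 0)) →
    (∀ c ∈ p.drop pos, fsIsNum c = fsIsNum (p.getD pos ' ')) →
    (let st := (r.zipIdx p.length).foldl (fsStepA (p ++ r)) (res, pos)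
     st.1 ++ [(p ++ r).drop st.2])
    = (let st := r.foldl fsStepB (res, p.drop pos)
     st.1 ++ [st.2]) := by
  intro r
  induction r with
  | nil =>
    intro p res pos hpos hrun
    simp
  | cons ch r ih =>
    intro p res pos hpos hrun
    have hl : p ++ ch :: r = (p ++ [ch]) ++ r := by simp
    simp only [List.zipIdx_cons, List.foldl_cons]
    rcases hpos with hlt | ⟨hp, hp0⟩
    · -- pos < p.length : the current run p.drop pos is nonempty
      have hget : PySem.List.pyGet? (p ++ ch :: r) ((pos : Nat) : Int) = some p[pos] := by
        rw [PySem.List.pyGet?_natCast]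
        rw [List.getElem?_append_left hlt, List.getElem?_eq_getElem hlt]
      have hcurne : p.drop pos ≠ [] := by
        simp only [ne_eq, List.drop_eq_nil_iff]
        omega
      cases hcl : (p.drop pos).getLast? with
      | none => exact absurd (List.getLast?_eq_none_iff.mp hcl) hcurne
      | some last =>
        have hlastnum : fsIsNum last = fsIsNum (p.getD pos ' ') :=
          hrun last (List.mem_of_getLast? hcl)
        have hgetD : p.getD pos ' ' = p[pos] := List.getD_eq_getElem p ' ' hlt
        rw [hgetD] at hlastnum
        have hdropch : (p ++ [ch]).drop pos = p.drop pos ++ [ch] :=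
          List.drop_append_of_le_length (le_of_lt hlt)
        have hgetDch : (p ++ [ch]).getD pos ' ' = p[pos] := by
          have : pos < (p ++ [ch]).length := by simp; omega
          rw [List.getD_eq_getElem _ ' ' this, List.getElem_append_left hlt]
        by_cases hc : fsIsNum ch = fsIsNum p[pos]
        · -- same type: A continues, B extends cur
          have hA : fsStepA (p ++ ch :: r) (res, pos) (ch, p.length) = (res, pos) := by
            simp [fsStepA, hget, fsJudge_eq, hc]
          have hB : fsStepB (res, p.drop pos) ch = (res, p.drop pos ++ [ch]) := by
            simp [fsStepB, hcl, hlastnum, hc]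
          rw [hA, hB, hl]
          have := ih (p ++ [ch]) res pos (by left; simp; omega)
            (by
              intro c hcmem
              rw [hdropch] at hcmem
              rw [hgetDch]
              rcases List.mem_append.mp hcmem with h | h
              · rw [hrun c h, hgetD]
              · simp at h; rw [h, hc])
          simpa [hdropch] using this
        · -- type change: A slices off the run, B pushes cur
          have hslice : PySem.List.slice (p ++ ch :: r) (some ((pos : Nat) : Int))
              (some ((p.length : Nat) : Int)) = p.drop pos := by
            rw [PySem.List.slice_natCast,
              List.drop_append_of_le_length (le_of_lt hlt)]
            have hlen : (p.drop pos).length = p.length - pos := List.length_drop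
            rw [List.take_left' hlen]
          have hA : fsStepA (p ++ ch :: r) (res, pos) (ch, p.length)
              = (res ++ [p.drop pos], p.length) := by
            simp [fsStepA, hget, fsJudge_eq, hc, hslice]
          have hB : fsStepB (res, p.drop pos) ch = (res ++ [p.drop pos], [ch]) := by
            simp [fsStepB, hcl, hlastnum, Ne.symm hc]
          rw [hA, hB, hl]
          have hdropfull : (p ++ [ch]).drop p.length = [ch] := by
            rw [List.drop_append_of_le_length (le_refl _)]
            simp
          have := ih (p ++ [ch]) (res ++ [p.drop pos]) p.length (by left; simp)
            (by
              intro c hcmem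
              rw [hdropfull] at hcmem
              simp at hcmem
              rw [hcmem]
              have : (p ++ [ch]).getD p.length ' ' = ch := by
                have hlt2 : p.length < (p ++ [ch]).length := by simp
                rw [List.getD_eq_getElem _ ' ' hlt2]
                simp
              rw [this])
          simpa [hdropfull] using this
    · -- p = [], pos = 0 : first character starts the run
      subst hp; subst hp0
      simp only [List.nil_append, List.length_nil, List.drop_zero] at *
      have hA : fsStepA (ch :: r) (res, 0) (ch, 0) = (res, 0) := by
        simp [fsStepA, PySem.List.pyGet?, PySem.List.pyIdx?, fsJudge_eq]
      have hB : fsStepB (res, ([] : List Char)) ch = (res, [ch]) := by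
        simp [fsStepB]
      rw [hA, hB]
      have := ih [ch] res 0 (by left; simp)
        (by intro c hc; simp at hc; simp [hc, List.getD])
      simpa using this

theorem formula_split_spec : Claim_equal_formula_split := by
  intro formula _
  unfold Spec_formula_split formula_split formula_split_alt
  have h := fs_key (PySem.Chars.stripChars formula.toList [' ']) [] [] 0
      (Or.inr ⟨rfl, rfl⟩) (by intro c hc; simp at hc)
  simp only [List.nil_append, List.drop_zero, List.length_nil] at h
  simp only [PySem.List.slice_from_natCast]
  rw [h]
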